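-- pv_equiv track=rewrite | github.com/pypi-data/pypi-mirror-221 | packages/vinhvh-package/vinhvh_package-0.0.13-py3-none-any.whl/vinhvh_package/test_module.py | type_site
-- ===== SOURCE A (Python) =====
-- def type_site(x):
--     site_types = {
--         'IBC': ['7', '8', '9', 'J', 'K', 'L', 'M', 'N', 'O', 'P', 'Q', 'R', 'I4BA', 'I4BB', 'I4BC', 'I4BD', 'I4BE', 'I4BF', 'I4BJ', 'I4BK', 'I4CA', 'I4CB', 'I4CC', 'I4CD', 'I4CE', 'I4CF', 'I4CJ', 'I4CK'],
--         'Macro': ['1', '2', '3', '4', '5', '6', 'A', 'B', 'D', 'E', 'F', 'G', 'H', 'I', 'M4BA', 'M4BB', 'M4BC', 'M4BD', 'M4BE', 'M4BF', 'M4BG', 'M4BH', 'M4BI', 'M4CA', 'M4CB', 'M4CC', 'M4CD', 'M4CE', 'U4BA', 'U4BB', 'U4BC', 'U4CA', 'U4CB', 'U4CC', 'A_LTE', 'B_LTE', 'C_LTE', 'D_LTE', 'E_LTE', 'F_LTE'],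
--         'CRAN - indoor': ['J4BA', 'J4BB', 'J4BC', 'J4CA', 'J4CB', 'J4CC'],
--         'CRAN - outdoor': ['C4BA', 'C4BB', 'C4BC', 'C4CA', 'C4CB', 'C4CC'],
--         'Smallcell': ['S']
--     }
--     for site_type, codes in site_types.items():
--         if x in codes:
--             return site_type
--     return 'Other'
-- ===== SOURCE B (Python) =====
-- # Flat reverse-lookup table: one direct dict lookup instead of scanning grouped lists.
-- _CATEGORY = {
--     '7': 'IBC',
--     '8': 'IBC',
--     '9': 'IBC',
--     'J': 'IBC',
--     'K': 'IBC',
--     'L': 'IBC',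
--     'M': 'IBC',
--     'N': 'IBC',
--     'O': 'IBC',
--     'P': 'IBC',
--     'Q': 'IBC',
--     'R': 'IBC',
--     'I4BA': 'IBC',
--     'I4BB': 'IBC',
--     'I4BC': 'IBC',
--     'I4BD': 'IBC',
--     'I4BE': 'IBC',
--     'I4BF': 'IBC',
--     'I4BJ': 'IBC',
--     'I4BK': 'IBC',
--     'I4CA': 'IBC',
--     'I4CB': 'IBC',
--     'I4CC': 'IBC',
--     'I4CD': 'IBC',
--     'I4CE': 'IBC',
--     'I4CF': 'IBC',
--     'I4CJ': 'IBC',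
--     'I4CK': 'IBC',
--     '1': 'Macro',
--     '2': 'Macro',
--     '3': 'Macro',
--     '4': 'Macro',
--     '5': 'Macro',
--     '6': 'Macro',
--     'A': 'Macro',
--     'B': 'Macro',
--     'D': 'Macro',
--     'E': 'Macro',
--     'F': 'Macro',
--     'G': 'Macro',
--     'H': 'Macro',
--     'I': 'Macro',
--     'M4BA': 'Macro',
--     'M4BB': 'Macro',
--     'M4BC': 'Macro',
--     'M4BD': 'Macro',
--     'M4BE': 'Macro',
--     'M4BF': 'Macro',
--     'M4BG': 'Macro',
--     'M4BH': 'Macro',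
--     'M4BI': 'Macro',
--     'M4CA': 'Macro',
--     'M4CB': 'Macro',
--     'M4CC': 'Macro',
--     'M4CD': 'Macro',
--     'M4CE': 'Macro',
--     'U4BA': 'Macro',
--     'U4BB': 'Macro',
--     'U4BC': 'Macro',
--     'U4CA': 'Macro',
--     'U4CB': 'Macro',
--     'U4CC': 'Macro',
--     'A_LTE': 'Macro',
--     'B_LTE': 'Macro',
--     'C_LTE': 'Macro',
--     'D_LTE': 'Macro',
--     'E_LTE': 'Macro',
--     'F_LTE': 'Macro',
--     'J4BA': 'CRAN - indoor',
--     'J4BB': 'CRAN - indoor',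
--     'J4BC': 'CRAN - indoor',
--     'J4CA': 'CRAN - indoor',
--     'J4CB': 'CRAN - indoor',
--     'J4CC': 'CRAN - indoor',
--     'C4BA': 'CRAN - outdoor',
--     'C4BB': 'CRAN - outdoor',
--     'C4BC': 'CRAN - outdoor',
--     'C4CA': 'CRAN - outdoor',
--     'C4CB': 'CRAN - outdoor',
--     'C4CC': 'CRAN - outdoor',
--     'S': 'Smallcell',
-- }
--
--
-- def type_site(x):
--     return _CATEGORY.get(x, 'Other')
-- ===== Notes on version B (the rewrite author's own statement) =====
-- stated objective: idiomatic
-- what changed: Replaced the loop over grouped category lists (five membership scans) by one flat code-to-category dict built once at module level and a single dict.get with the same default category.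
import Mathlib
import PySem

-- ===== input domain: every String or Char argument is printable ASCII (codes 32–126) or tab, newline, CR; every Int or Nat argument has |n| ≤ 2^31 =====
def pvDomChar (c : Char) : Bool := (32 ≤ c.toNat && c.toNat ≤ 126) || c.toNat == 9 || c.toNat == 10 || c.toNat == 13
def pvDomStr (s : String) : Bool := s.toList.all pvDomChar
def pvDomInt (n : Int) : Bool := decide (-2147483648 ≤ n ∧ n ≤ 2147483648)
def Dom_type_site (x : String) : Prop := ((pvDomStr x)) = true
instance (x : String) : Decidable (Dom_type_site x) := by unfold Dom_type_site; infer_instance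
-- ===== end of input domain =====

-- B replaces A's loop over grouped code lists by a single flat code→category dict lookup (idiomatic).

-- ===== PORT A =====
def siteTypesA : List (String × List String) := [
  ("IBC", ["7", "8", "9", "J", "K", "L", "M", "N", "O", "P", "Q", "R", "I4BA", "I4BB", "I4BC", "I4BD", "I4BE", "I4BF", "I4BJ", "I4BK", "I4CA", "I4CB", "I4CC", "I4CD", "I4CE", "I4CF", "I4CJ", "I4CK"]),
  ("Macro", ["1", "2", "3", "4", "5", "6", "A", "B", "D", "E", "F", "G", "H", "I", "M4BA", "M4BB", "M4BC", "M4BD", "M4BE", "M4BF", "M4BG", "M4BH", "M4BI", "M4CA", "M4CB", "M4CC", "M4CD", "M4CE", "U4BA", "U4BB", "U4BC", "U4CA", "U4CB", "U4CC", "A_LTE", "B_LTE", "C_LTE", "D_LTE", "E_LTE", "F_LTE"]),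
  ("CRAN - indoor", ["J4BA", "J4BB", "J4BC", "J4CA", "J4CB", "J4CC"]),
  ("CRAN - outdoor", ["C4BA", "C4BB", "C4BC", "C4CA", "C4CB", "C4CC"]),
  ("Smallcell", ["S"])
]

-- the 'for site_type, codes in site_types.items(): if x in codes: return site_type' loop
def loopA (x : String) : List (String × List String) → String
  | [] => "Other"
  | (siteType, codes) :: rest => if codes.contains x then siteType else loopA x rest

def type_site (x : String) : String := loopA x siteTypesA

-- ===== PORT B =====
-- the flat dict literal _CATEGORY of Source B (all 81 keys are distinct)
def categoryB : PySem.Dict String String := PySem.Dict.ofList [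
  ("7", "IBC"), ("8", "IBC"), ("9", "IBC"), ("J", "IBC"), ("K", "IBC"), ("L", "IBC"),
  ("M", "IBC"), ("N", "IBC"), ("O", "IBC"), ("P", "IBC"), ("Q", "IBC"), ("R", "IBC"),
  ("I4BA", "IBC"), ("I4BB", "IBC"), ("I4BC", "IBC"), ("I4BD", "IBC"), ("I4BE", "IBC"), ("I4BF", "IBC"),
  ("I4BJ", "IBC"), ("I4BK", "IBC"), ("I4CA", "IBC"), ("I4CB", "IBC"), ("I4CC", "IBC"), ("I4CD", "IBC"),
  ("I4CE", "IBC"), ("I4CF", "IBC"), ("I4CJ", "IBC"), ("I4CK", "IBC"), ("1", "Macro"), ("2", "Macro"),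
  ("3", "Macro"), ("4", "Macro"), ("5", "Macro"), ("6", "Macro"), ("A", "Macro"), ("B", "Macro"),
  ("D", "Macro"), ("E", "Macro"), ("F", "Macro"), ("G", "Macro"), ("H", "Macro"), ("I", "Macro"),
  ("M4BA", "Macro"), ("M4BB", "Macro"), ("M4BC", "Macro"), ("M4BD", "Macro"), ("M4BE", "Macro"), ("M4BF", "Macro"),
  ("M4BG", "Macro"), ("M4BH", "Macro"), ("M4BI", "Macro"), ("M4CA", "Macro"), ("M4CB", "Macro"), ("M4CC", "Macro"),
  ("M4CD", "Macro"), ("M4CE", "Macro"), ("U4BA", "Macro"), ("U4BB", "Macro"), ("U4BC", "Macro"), ("U4CA", "Macro"),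
  ("U4CB", "Macro"), ("U4CC", "Macro"), ("A_LTE", "Macro"), ("B_LTE", "Macro"), ("C_LTE", "Macro"), ("D_LTE", "Macro"),
  ("E_LTE", "Macro"), ("F_LTE", "Macro"), ("J4BA", "CRAN - indoor"), ("J4BB", "CRAN - indoor"), ("J4BC", "CRAN - indoor"), ("J4CA", "CRAN - indoor"),
  ("J4CB", "CRAN - indoor"), ("J4CC", "CRAN - indoor"), ("C4BA", "CRAN - outdoor"), ("C4BB", "CRAN - outdoor"), ("C4BC", "CRAN - outdoor"), ("C4CA", "CRAN - outdoor"),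
  ("C4CB", "CRAN - outdoor"), ("C4CC", "CRAN - outdoor"), ("S", "Smallcell")
]

def type_site_alt (x : String) : String := categoryB.getD x "Other"

-- ===== PRECONDITION & SPEC =====
def Spec_type_site (x : String) (out : String) : Prop := out = type_site_alt x
instance (x : String) (out : String) : Decidable (Spec_type_site x out) := by unfold Spec_type_site; infer_instance

-- ===== CLAIM (what is proved, stated in full; the proofs are below) =====
def Claim_equal_type_site : Prop := ∀ (x : String), Dom_type_site x → Spec_type_site x (type_site x)

-- ===== LEMMAS AND PROOFS =====

/-- Flattening a grouped table into (code, category) pairs. -/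
def flatten (gs : List (String × List String)) : List (String × String) :=
  gs.flatMap (fun p => p.2.map (fun c => (c, p.1)))

lemma get?_mk_map_append (x n : String) (cs : List String) (rest : List (String × String)) :
    (PySem.Dict.mk (cs.map (fun c => (c, n)) ++ rest)).get? x
      = if cs.contains x then some n else (PySem.Dict.mk rest).get? x := by
  induction cs with
  | nil => simp
  | cons c cs ih =>
      simp only [List.map_cons, List.cons_append, PySem.Dict.get?_mk_cons, List.contains_cons]
      by_cases h : c = x
      · subst h; simp
      · simp [h, Ne.symm h, ih]

lemma loopA_eq_flatten (x : String) (gs : List (String × List String)) :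
    loopA x gs = (PySem.Dict.mk (flatten gs)).getD x "Other" := by
  induction gs with
  | nil => rfl
  | cons p rest ih =>
      obtain ⟨n, cs⟩ := p
      simp only [loopA, flatten, List.flatMap_cons,
        PySem.Dict.getD_eq_get?_getD, get?_mk_map_append]
      split
      · rfl
      · simpa [flatten, PySem.Dict.getD_eq_get?_getD] using ih

-- the 81 keys are distinct, so the dict literal is exactly the flattened grouped table
set_option maxRecDepth 20000 in
lemma categoryB_eq_mk_flatten : categoryB = PySem.Dict.mk (flatten siteTypesA) := by decide

-- ===== VERDICT (by name: the statement is the Claim_ definition above) =====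
theorem type_site_spec : Claim_equal_type_site := by
  intro x _
  show type_site x = type_site_alt x
  rw [type_site, loopA_eq_flatten, type_site_alt, categoryB_eq_mk_flatten]
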